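-- pv_equiv track=rewrite | github.com/daerduoCarey/Surreal | surreal/utils/console/colorize.py | _replace_n
-- ===== SOURCE A (Python) =====
-- def _replace_n(s, spans, replacements):
--     # replace all spans (list of tuples) with new substrings
--     assert len(spans) == len(replacements)
--     if not spans:
--         return s
--     new_s = s[:spans[0][0]]
--     for i in range(len(spans) - 1):
--         assert spans[i][1] <= spans[i+1][0]
--         new_s += replacements[i] + s[spans[i][1]: spans[i+1][0]]
--     return new_s + replacements[-1] + s[spans[-1][1]:]
-- ===== SOURCE B (Python) =====
-- def _replace_n(s, spans, replacements):
--     # build the result back-to-front: walk spans right-to-left, prepending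
--     # each replacement and the gap that follows it, then prepend the prefix
--     assert len(spans) == len(replacements)
--     res = ""
--     bound = None
--     for (start, end), rep in zip(reversed(spans), reversed(replacements)):
--         res = rep + s[end:bound] + res
--         bound = start
--     return s[:bound] + res
-- ===== Notes on version B (the rewrite author's own statement) =====
-- stated objective: alternative
-- what changed: B builds the result back-to-front: it walks spans and replacements right-to-left, prepending each replacement plus the gap up to the previously processed start, then prepends the untouched prefix once; A walks left-to-right appending with special-cased prefix/suffix and index arithmetic.
import Mathlib
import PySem

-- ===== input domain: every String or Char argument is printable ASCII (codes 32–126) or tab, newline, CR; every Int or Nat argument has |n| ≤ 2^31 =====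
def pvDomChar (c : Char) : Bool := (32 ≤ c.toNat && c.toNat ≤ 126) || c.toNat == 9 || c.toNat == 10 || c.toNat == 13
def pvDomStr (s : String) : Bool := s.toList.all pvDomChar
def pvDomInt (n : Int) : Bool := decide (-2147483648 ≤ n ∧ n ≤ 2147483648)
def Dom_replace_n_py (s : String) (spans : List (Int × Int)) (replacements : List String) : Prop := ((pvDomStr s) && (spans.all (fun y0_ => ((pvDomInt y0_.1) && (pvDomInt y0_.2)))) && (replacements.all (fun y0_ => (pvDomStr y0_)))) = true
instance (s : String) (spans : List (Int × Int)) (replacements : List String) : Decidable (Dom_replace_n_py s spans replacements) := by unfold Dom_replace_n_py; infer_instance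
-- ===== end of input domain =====

-- B builds the result back-to-front (right-to-left over spans, prepending), where A appends
-- left-to-right with a special-cased prefix/suffix; alternative decomposition, same O(n) cost.

-- ===== PORT A =====
-- Literal port of A. A's asserts (len(spans) == len(replacements), and the adjacency check
-- spans[i][1] <= spans[i+1][0] in the loop) raise AssertionError; exactly those inputs are
-- excluded by Pre_ below, so the port proceeds without them (indexing via pyGetD, in range under Pre_).
def replace_n_py (s : String) (spans : List (Int × Int)) (replacements : List String) : String :=
  if spans = [] then s
  else
    String.ofList (
      -- new_s = s[:spans[0][0]]; for i in range(len(spans)-1): new_s += replacements[i] + s[spans[i][1]:spans[i+1][0]]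
      ((PySem.List.pyRange 0 ((spans.length : Int) - 1) 1).foldl
        (fun acc i =>
          acc ++ ((PySem.List.pyGetD replacements i "").toList
            ++ PySem.List.slice s.toList (some (PySem.List.pyGetD spans i (0, 0)).2)
                                         (some (PySem.List.pyGetD spans (i + 1) (0, 0)).1)))
        (PySem.List.slice s.toList none (some (PySem.List.pyGetD spans 0 (0, 0)).1)))
      -- return new_s + replacements[-1] + s[spans[-1][1]:]
      ++ (PySem.List.pyGetD replacements (-1) "").toList
      ++ PySem.List.slice s.toList (some (PySem.List.pyGetD spans (-1) (0, 0)).2) none)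

-- ===== PORT B =====
-- Literal port of B: fold over zip(reversed(spans), reversed(replacements)) threading
-- (res, bound : Option Int) — bound none = Python's initial bound None — then s[:bound] + res.
def replace_n_py_alt (s : String) (spans : List (Int × Int)) (replacements : List String) : String :=
  String.ofList
    (PySem.List.slice s.toList none
      (((spans.reverse).zip replacements.reverse).foldl
        (fun (st : List Char × Option Int) p =>
          (p.2.toList ++ PySem.List.slice s.toList (some p.1.2) st.2 ++ st.1, some p.1.1))
        ([], none)).2
    ++ (((spans.reverse).zip replacements.reverse).foldl
        (fun (st : List Char × Option Int) p =>
          (p.2.toList ++ PySem.List.slice s.toList (some p.1.2) st.2 ++ st.1, some p.1.1))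
        ([], none)).1)

-- ===== PRECONDITION & SPEC =====
-- Pre_ excludes exactly the inputs on which A's asserts raise AssertionError:
-- unequal lengths, or some consecutive spans with spans[i][1] > spans[i+1][0].
def Pre_replace_n_py (s : String) (spans : List (Int × Int)) (replacements : List String) : Prop :=
  spans.length = replacements.length ∧
  ∀ pq ∈ spans.zip spans.tail, pq.1.2 ≤ pq.2.1
instance (s : String) (spans : List (Int × Int)) (replacements : List String) : Decidable (Pre_replace_n_py s spans replacements) := by unfold Pre_replace_n_py; infer_instance

def pvWitness_replace_n_py : String × (List (Int × Int)) × List String :=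
  ("abcdef", [(1, 2), (3, 4)], ["X", "Y"])

def Spec_replace_n_py (s : String) (spans : List (Int × Int)) (replacements : List String) (out : String) : Prop := out = replace_n_py_alt s spans replacements
instance (s : String) (spans : List (Int × Int)) (replacements : List String) (out : String) : Decidable (Spec_replace_n_py s spans replacements out) := by unfold Spec_replace_n_py; infer_instance

-- ===== CLAIM (what is proved, stated in full; the proofs are below) =====
def Claim_equal_replace_n_py : Prop := ∀ (s : String) (spans : List (Int × Int)) (replacements : List String), Dom_replace_n_py s spans replacements → Pre_replace_n_py s spans replacements → Spec_replace_n_py s spans replacements (replace_n_py s spans replacements)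

-- ===== LEMMAS AND PROOFS =====

-- the pieces B's right-to-left loop emits, as a structural recursion with an Option bound
def pvChunks (cs : List Char) : List ((Int × Int) × String) → Option Int → List Char
  | [], c => PySem.List.slice cs c none
  | (⟨a, e⟩, r) :: t, c =>
      PySem.List.slice cs c (some a) ++ r.toList ++ pvChunks cs t (some e)

-- the piece A's loop emits at index i, as a function of ((spans[i], spans[i+1]), replacements[i])
def pvPiece (cs : List Char) (z : ((Int × Int) × (Int × Int)) × String) : List Char :=
  z.2.toList ++ PySem.List.slice cs (some z.1.1.2) (some z.1.2.1)

theorem zip_rev {α β : Type} : ∀ (l1 : List α) (l2 : List β), l1.length = l2.length →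
    l1.reverse.zip l2.reverse = (l1.zip l2).reverse := by
  intro l1
  induction l1 with
  | nil => intro l2 h; match l2, h with | [], _ => rfl
  | cons x t ih =>
      intro l2 h
      match l2, h with
      | y :: t2, h =>
        have h' : t.length = t2.length := by simpa using h
        simp only [List.reverse_cons, List.zip_cons_cons]
        rw [List.zip_append (by simp [h']), ih t2 h']
        simp

-- B's reversed fold, read back-to-front, produces pvChunks of the forward zip list
theorem alt_go (cs : List Char) :
    ∀ (l : List ((Int × Int) × String)) (b : Option Int),
    PySem.List.slice cs b
        ((l.reverse.foldl (fun (st : List Char × Option Int) p =>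
          (p.2.toList ++ PySem.List.slice cs (some p.1.2) st.2 ++ st.1, some p.1.1))
        ([], none)).2)
      ++ (l.reverse.foldl (fun (st : List Char × Option Int) p =>
          (p.2.toList ++ PySem.List.slice cs (some p.1.2) st.2 ++ st.1, some p.1.1))
        ([], none)).1
    = pvChunks cs l b := by
  intro l
  rw [List.foldl_reverse]
  induction l with
  | nil => intro b; simp [pvChunks]
  | cons p t ih =>
      intro b
      obtain ⟨⟨a, e⟩, r⟩ := p
      simp only [List.foldr_cons, pvChunks]
      rw [← ih (some e)]
      simp [List.append_assoc]

theorem chunks_eq (cs : List Char) :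
    ∀ (t : List (Int × Int)) (rp : List String) (a e : Int) (r : String) (c : Option Int),
    t.length = rp.length →
    pvChunks cs (((a, e) :: t).zip (r :: rp)) c
    = PySem.List.slice cs c (some a)
      ++ (((((a, e) :: t).zip t).zip (r :: rp)).map (pvPiece cs)).flatten
      ++ ((r :: rp).getLastD "").toList
      ++ PySem.List.slice cs (some (((a, e) :: t).getLastD (0, 0)).2) none := by
  intro t
  induction t with
  | nil =>
      intro rp a e r c h
      match rp, h with
      | [], _ => simp [pvChunks]
  | cons q t' ih =>
      intro rp a e r c h
      obtain ⟨a', e'⟩ := q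
      match rp, h with
      | r' :: rp', h =>
        have h' : t'.length = rp'.length := by simpa using h
        have step := ih rp' a' e' r' (some e)
        simp only [List.zip_cons_cons] at step ⊢
        rw [pvChunks, step h']
        simp [pvPiece, List.append_assoc]

theorem map_range_eq (cs : List Char) (sp : List (Int × Int)) (rp : List String)
    (hlen : sp.length = rp.length) :
    (PySem.List.pyRange 0 ((sp.length : Int) - 1) 1).map
      (fun i => (PySem.List.pyGetD rp i "").toList
        ++ PySem.List.slice cs (some (PySem.List.pyGetD sp i (0, 0)).2)
                               (some (PySem.List.pyGetD sp (i + 1) (0, 0)).1))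
    = ((sp.zip sp.tail).zip rp).map (pvPiece cs) := by
  cases sp with
  | nil => simp [PySem.List.pyRange_one_eq_nil]
  | cons x0 t0 =>
  have hne : 1 ≤ (x0 :: t0).length := by simp
  generalize hsp : (x0 :: t0 : List (Int × Int)) = sp
  rw [hsp] at hne hlen
  have hZ : ((sp.zip sp.tail).zip rp).length = sp.length - 1 := by
    subst hsp
    simp [List.length_zip, ← hlen]
  have hlen' : ((sp.length : Int) - 1) = (((sp.zip sp.tail).zip rp).length : Int) := by
    rw [hZ]; omega
  rw [hlen']
  calc (PySem.List.pyRange 0 ((((sp.zip sp.tail).zip rp).length : Int)) 1).map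
        (fun i => (PySem.List.pyGetD rp i "").toList
          ++ PySem.List.slice cs (some (PySem.List.pyGetD sp i (0, 0)).2)
                                 (some (PySem.List.pyGetD sp (i + 1) (0, 0)).1))
      = (PySem.List.pyRange 0 ((((sp.zip sp.tail).zip rp).length : Int)) 1).map
        (fun i => pvPiece cs (PySem.List.pyGetD ((sp.zip sp.tail).zip rp) i (((0,0),(0,0)), ""))) := by
        apply List.map_congr_left
        intro i hi
        rw [PySem.List.mem_pyRange_one] at hi
        obtain ⟨h0, h1⟩ := hi
        rw [hZ] at h1
        have h1' : i < (sp.length : Int) - 1 := by omega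
        have hiN : i.toNat < sp.length - 1 := by omega
        have htail : sp.tail.length = sp.length - 1 := by simp [List.length_tail]
        rw [PySem.List.pyGetD_eq_getElem ((sp.zip sp.tail).zip rp) _ h0
          (by rw [hZ]; omega)]
        rw [PySem.List.pyGetD_eq_getElem rp _ h0 (by omega)]
        rw [PySem.List.pyGetD_eq_getElem sp _ h0 (by omega)]
        rw [PySem.List.pyGetD_eq_getElem sp _ (by omega) (by omega)]
        have hts : ((i : Int) + 1).toNat = i.toNat + 1 := by omega
        simp only [hts]
        simp [pvPiece, List.getElem_zip, List.getElem_tail]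
    _ = ((sp.zip sp.tail).zip rp).map (pvPiece cs) := by
        rw [show (fun i => pvPiece cs (PySem.List.pyGetD ((sp.zip sp.tail).zip rp) i (((0,0),(0,0)), "")))
            = (pvPiece cs) ∘ (fun i => PySem.List.pyGetD ((sp.zip sp.tail).zip rp) i (((0,0),(0,0)), "")) from rfl]
        rw [← List.map_map]
        rw [PySem.List.map_pyGetD_pyRange_zero']

-- ===== VERDICT (by name: the statement is the Claim_ definition above) =====
theorem replace_n_py_spec : Claim_equal_replace_n_py := by
  intro s spans replacements _ hpre
  obtain ⟨hlen, _⟩ := hpre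
  unfold Spec_replace_n_py replace_n_py replace_n_py_alt
  cases spans with
  | nil =>
      match replacements, hlen with
      | [], _ => simp
  | cons x t =>
      obtain ⟨a0, e0⟩ := x
      rw [if_neg (by simp)]
      match replacements, hlen with
      | r0 :: rp, hlen =>
        have hlen' : t.length = rp.length := by simpa using hlen
        rw [zip_rev _ _ hlen]
        rw [alt_go]
        rw [chunks_eq s.toList t rp a0 e0 r0 none hlen']
        rw [PySem.List.foldl_append_eq_flatMap]
        rw [List.flatMap_def]
        rw [map_range_eq s.toList ((a0, e0) :: t) (r0 :: rp) hlen]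
        have hlast_r : PySem.List.pyGetD (r0 :: rp) (-1) "" = (r0 :: rp).getLastD "" := by
          rw [PySem.List.pyGetD_neg_one (r0 :: rp) "" (by simp)]
          simp [List.getLastD_eq_getLast?, List.getLast?_eq_some_getLast]
        have hlast_s : PySem.List.pyGetD ((a0, e0) :: t) (-1) (0, 0)
            = ((a0, e0) :: t).getLastD (0, 0) := by
          rw [PySem.List.pyGetD_neg_one ((a0, e0) :: t) (0, 0) (by simp)]
          simp [List.getLastD_eq_getLast?, List.getLast?_eq_some_getLast]
        rw [hlast_r, hlast_s]
        simp [List.append_assoc]
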